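-- pv_equiv track=rewrite | github.com/fabio-d/esp32-tuntap | esp32-tuntap.py | protocol_string
-- ===== SOURCE A (Python) =====
-- def protocol_string(val: str):
--     flags = {'b': '', 'g': '', 'n': '', 'l': ''}
--     for c in val:
--         if c in flags:
--             flags[c] = c
--         else:
--             raise ValueError(val)
--     return ''.join(flags.values())
-- ===== SOURCE B (Python) =====
-- def protocol_string(val: str):
--     if not set(val) <= set('bgnl'):
--         raise ValueError(val)
--     return ''.join(c for c in 'bgnl' if c in val)
-- ===== Notes on version B (the rewrite author's own statement) =====
-- stated objective: simpler
-- what changed: B validates the whole string with a set-subset test and then builds the canonical result by iterating over the fixed alphabet 'bgnl' and keeping the flags present in val, instead of A's per-character loop that fills slots of a pre-built dict and joins its values.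
import Mathlib
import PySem

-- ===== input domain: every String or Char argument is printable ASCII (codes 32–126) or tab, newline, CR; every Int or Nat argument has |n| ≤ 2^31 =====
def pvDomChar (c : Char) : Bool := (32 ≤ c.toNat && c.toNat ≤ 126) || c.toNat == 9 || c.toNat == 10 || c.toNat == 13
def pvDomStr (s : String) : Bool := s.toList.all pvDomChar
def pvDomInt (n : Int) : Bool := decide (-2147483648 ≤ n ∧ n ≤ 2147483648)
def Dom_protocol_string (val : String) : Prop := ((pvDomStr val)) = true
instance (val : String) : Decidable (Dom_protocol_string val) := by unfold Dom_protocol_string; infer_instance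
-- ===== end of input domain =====

-- B validates via a subset test and joins the fixed alphabet 'bgnl' filtered by membership in val;
-- same result as A's dict-slot loop on every non-raising input (Pre_ excludes exactly the raising inputs).

-- ===== PORT A =====
-- the for-loop over val: 'some d' = loop finished, 'none' = raise ValueError(val)
def protocolLoopA : List Char → PySem.Dict Char String → Option (PySem.Dict Char String)
  | [], d => some d
  | c :: rest, d =>
      if d.contains c then protocolLoopA rest (d.insert c (String.ofList [c]))
      else none

def protocol_string (val : String) : String :=
  let flags : PySem.Dict Char String :=
    PySem.Dict.mk [('b', ""), ('g', ""), ('n', ""), ('l', "")]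
  match protocolLoopA val.toList flags with
  | some d => PySem.Str.join "" d.values
  | none => ""   -- unreachable under Pre_ (Python raises ValueError here)

-- ===== PORT B =====
def protocol_string_alt (val : String) : String :=
  if (PySem.Set.ofList val.toList).issubset (PySem.Set.ofList "bgnl".toList) then
    PySem.Str.join "" (("bgnl".toList.filter (fun c => val.toList.contains c)).map (fun c => String.ofList [c]))
  else ""   -- unreachable under Pre_ (Python raises ValueError here)

-- ===== PRECONDITION & SPEC =====
-- Pre_: exactly the inputs where A returns (every character is one of the four flags); elsewhere A raises ValueError.
def Pre_protocol_string (val : String) : Prop :=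
  val.toList.all (fun c => c ∈ (['b', 'g', 'n', 'l'] : List Char)) = true
instance (val : String) : Decidable (Pre_protocol_string val) := by unfold Pre_protocol_string; infer_instance
def pvWitness_protocol_string : String := "lngbb"

def Spec_protocol_string (val : String) (out : String) : Prop := out = protocol_string_alt val
instance (val : String) (out : String) : Decidable (Spec_protocol_string val out) := by unfold Spec_protocol_string; infer_instance

-- ===== CLAIM (what is proved, stated in full; the proofs are below) =====
def Claim_equal_protocol_string : Prop := ∀ (val : String), Dom_protocol_string val → Pre_protocol_string val → Spec_protocol_string val (protocol_string val)

-- ===== LEMMAS AND PROOFS =====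

-- literal 4-slot dict, as A's loop maintains it
def D4 (b g n l : String) : PySem.Dict Char String :=
  PySem.Dict.mk [('b', b), ('g', g), ('n', n), ('l', l)]

theorem protocolLoopA_D4 (cs : List Char)
    (h : ∀ c ∈ cs, c ∈ (['b', 'g', 'n', 'l'] : List Char)) (b g n l : String) :
    protocolLoopA cs (D4 b g n l) =
      some (D4 (if 'b' ∈ cs then "b" else b) (if 'g' ∈ cs then "g" else g)
               (if 'n' ∈ cs then "n" else n) (if 'l' ∈ cs then "l" else l)) := by
  induction cs generalizing b g n l with
  | nil => simp [protocolLoopA]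
  | cons c rest ih =>
    have hc := h c (List.mem_cons_self ..)
    have hrest : ∀ x ∈ rest, x ∈ (['b', 'g', 'n', 'l'] : List Char) :=
      fun x hx => h x (List.mem_cons_of_mem _ hx)
    fin_cases hc
    · rw [protocolLoopA, show (D4 b g n l).contains 'b' = true from rfl, if_pos rfl,
          show (D4 b g n l).insert 'b' (String.ofList ['b']) = D4 "b" g n l from rfl, ih hrest]
      simp [List.mem_cons]
    · rw [protocolLoopA, show (D4 b g n l).contains 'g' = true from rfl, if_pos rfl,
          show (D4 b g n l).insert 'g' (String.ofList ['g']) = D4 b "g" n l from rfl, ih hrest]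
      simp [List.mem_cons]
    · rw [protocolLoopA, show (D4 b g n l).contains 'n' = true from rfl, if_pos rfl,
          show (D4 b g n l).insert 'n' (String.ofList ['n']) = D4 b g "n" l from rfl, ih hrest]
      simp [List.mem_cons]
    · rw [protocolLoopA, show (D4 b g n l).contains 'l' = true from rfl, if_pos rfl,
          show (D4 b g n l).insert 'l' (String.ofList ['l']) = D4 b g n "l" from rfl, ih hrest]
      simp [List.mem_cons]

theorem protocol_string_spec : Claim_equal_protocol_string := by
  intro val _ hpre
  have h : ∀ c ∈ val.toList, c ∈ (['b', 'g', 'n', 'l'] : List Char) := by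
    simpa [Pre_protocol_string, List.all_eq_true] using hpre
  unfold Spec_protocol_string protocol_string_alt
  have hsub : (PySem.Set.ofList val.toList).issubset (PySem.Set.ofList "bgnl".toList) = true := by
    rw [PySem.Set.issubset_iff]
    intro x hx
    have := h x (by simpa [PySem.Set.mem_ofList] using hx)
    simpa [PySem.Set.mem_ofList] using this
  rw [show protocol_string val =
        (match protocolLoopA val.toList (D4 "" "" "" "") with
         | some d => PySem.Str.join "" d.values
         | none => "") from rfl,
      protocolLoopA_D4 val.toList h, if_pos hsub]
  by_cases hb : 'b' ∈ val.toList <;> by_cases hg : 'g' ∈ val.toList <;>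
    by_cases hn : 'n' ∈ val.toList <;> by_cases hl : 'l' ∈ val.toList <;>
    simp [hb, hg, hn, hl, D4, PySem.Dict.values, List.filter] <;> rfl
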